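-- pv_equiv track=rewrite | github.com/cthiounn/adventofcode-2023-python | day13.py | find_all_symetric
-- ===== SOURCE A (Python) =====
-- def split_lines_into_two_part_from_indice(lines,indice):
--     return lines[:indice+1][::-1],lines[indice+1:]
--
-- def find_all_symetric(lines):
--     list_symetric=[]
--     for i in range(0,len(lines)-1):
--         if lines[i] == lines[i+1]:
--             a,b = split_lines_into_two_part_from_indice(lines,i)
--             size_a,size_b = len(a),len(b)
--             min_size = min(size_a,size_b)
--             if a[0:min_size] == b[0:min_size]:
--                 list_symetric.append(i)
--     return list_symetric
-- ===== SOURCE B (Python) =====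
-- def find_all_symetric(lines):
--     n = len(lines)
--     return [i for i in range(n - 1)
--             if all(lines[i - k] == lines[i + 1 + k]
--                    for k in range(min(i + 1, n - 1 - i)))]
-- ===== Notes on version B (the rewrite author's own statement) =====
-- stated objective: simpler
-- what changed: B drops A's slice/reverse/slice machinery entirely: instead of materialising the reversed left half and the right half and comparing their common-length prefixes (after a separate adjacent-pair guard), B checks each candidate axis with a single all() over index pairs lines[i-k] == lines[i+1+k], which also subsumes the guard as the k=0 case.
import Mathlib
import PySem

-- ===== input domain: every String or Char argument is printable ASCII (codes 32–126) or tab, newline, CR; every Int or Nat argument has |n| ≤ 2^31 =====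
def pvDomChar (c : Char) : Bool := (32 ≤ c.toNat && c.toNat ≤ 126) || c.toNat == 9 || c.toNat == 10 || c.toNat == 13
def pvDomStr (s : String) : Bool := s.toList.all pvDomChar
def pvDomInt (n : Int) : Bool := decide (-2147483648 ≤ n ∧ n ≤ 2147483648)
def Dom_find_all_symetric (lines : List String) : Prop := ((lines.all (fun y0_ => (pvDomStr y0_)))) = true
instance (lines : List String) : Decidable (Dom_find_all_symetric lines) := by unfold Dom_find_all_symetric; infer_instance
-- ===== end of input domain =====

-- B replaces A's per-candidate slice/reverse/slice comparisons by a direct index-pair check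
-- (all lines[i-k] == lines[i+1+k]) in one comprehension; simpler, same asymptotic cost.

-- ===== PORT A =====
-- lines[:indice+1][::-1] is ported as slice + List.reverse (exact: PySem.List.slice?_none_none_neg_one)
def split_lines_into_two_part_from_indice (lines : List String) (indice : Int) :
    List String × List String :=
  ((PySem.List.slice lines none (some (indice + 1))).reverse,
   PySem.List.slice lines (some (indice + 1)) none)

-- lines[i], lines[i+1]: i ranges over range(0, len-1), always in range, so pyGetD is exact here
def find_all_symetric (lines : List String) : List Int :=
  (PySem.List.pyRange 0 ((lines.length : Int) - 1) 1).foldl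
    (fun list_symetric i =>
      if PySem.List.pyGetD lines i "" == PySem.List.pyGetD lines (i + 1) "" then
        let ab := split_lines_into_two_part_from_indice lines i
        let size_a : Int := ab.1.length
        let size_b : Int := ab.2.length
        let min_size := min size_a size_b
        if PySem.List.slice ab.1 (some 0) (some min_size)
             == PySem.List.slice ab.2 (some 0) (some min_size) then
          list_symetric ++ [i]
        else list_symetric
      else list_symetric)
    []

-- ===== PORT B =====
def find_all_symetric_alt (lines : List String) : List Int :=
  let n : Int := lines.length
  (PySem.List.pyRange 0 (n - 1) 1).filter (fun i =>
    (PySem.List.pyRange 0 (min (i + 1) (n - 1 - i)) 1).all (fun k =>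
      PySem.List.pyGetD lines (i - k) "" == PySem.List.pyGetD lines (i + 1 + k) ""))

-- ===== PRECONDITION & SPEC =====
def Spec_find_all_symetric (lines : List String) (out : List Int) : Prop := out = find_all_symetric_alt lines
instance (lines : List String) (out : List Int) : Decidable (Spec_find_all_symetric lines out) := by unfold Spec_find_all_symetric; infer_instance

-- ===== CLAIM (what is proved, stated in full; the proofs are below) =====
def Claim_equal_find_all_symetric : Prop := ∀ (lines : List String), Dom_find_all_symetric lines → Spec_find_all_symetric lines (find_all_symetric lines)

-- ===== LEMMAS AND PROOFS =====

lemma pv_take_eq_iff (x y : List String) (m : Nat) :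
    x.take m = y.take m ↔ ∀ k, k < m → x[k]? = y[k]? := by
  constructor
  · intro h k hk
    have := congrArg (fun l => l[k]?) h
    simpa [hk] using this
  · intro h
    apply List.ext_getElem?
    intro k
    by_cases hk : k < m
    · simpa [hk] using h k hk
    · simp [hk]

lemma pv_cond_eq (lines : List String) (j : Nat) (hj : j + 1 < lines.length) :
    ((PySem.List.pyGetD lines (j : Int) "" == PySem.List.pyGetD lines ((j : Int) + 1) "") &&
      (PySem.List.slice ((lines.take (j+1)).reverse) (some 0)
          (some (min (((lines.take (j+1)).reverse).length : Int) ((lines.drop (j+1)).length : Int)))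
        == PySem.List.slice (lines.drop (j+1)) (some 0)
          (some (min (((lines.take (j+1)).reverse).length : Int) ((lines.drop (j+1)).length : Int))))) =
    (PySem.List.pyRange 0 (min ((j:Int) + 1) ((lines.length : Int) - 1 - (j:Int))) 1).all (fun k =>
      PySem.List.pyGetD lines ((j:Int) - k) "" == PySem.List.pyGetD lines ((j:Int) + 1 + k) "") := by
  set L := lines.length with hL
  set m : Nat := min (j+1) (L - (j+1)) with hm
  have hmle1 : m ≤ j + 1 := by omega
  have hmle2 : m ≤ L - (j+1) := by omega
  have hm1 : 1 ≤ m := by omega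
  have hlen_a : ((lines.take (j+1)).reverse).length = j + 1 := by
    simp [List.length_take]; omega
  have hlen_t : (lines.take (j+1)).length = j + 1 := by
    simp [List.length_take]; omega
  have hlen_b : (lines.drop (j+1)).length = L - (j+1) := by simp [← hL]
  have hmin1 : min ((((lines.take (j+1)).reverse).length : Nat) : Int) (((lines.drop (j+1)).length : Nat) : Int) = (m : Int) := by
    rw [hlen_a, hlen_b]; omega
  have hmin2 : min ((j:Int) + 1) ((L : Int) - 1 - (j:Int)) = (m : Int) := by omega
  rw [hmin1, hmin2]
  rw [PySem.List.slice_zero_start, PySem.List.slice_zero_start,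
      PySem.List.slice_to_natCast, PySem.List.slice_to_natCast]
  rw [Bool.eq_iff_iff]
  simp only [Bool.and_eq_true, beq_iff_eq, List.all_eq_true, PySem.List.mem_pyRange_one]
  rw [pv_take_eq_iff]
  -- index computations
  have ha : ∀ k, k < m → ((lines.take (j+1)).reverse)[k]? = lines[j-k]? := by
    intro k hk
    rw [List.getElem?_reverse (by omega), List.length_take]
    have : min (j+1) L - 1 - k = j - k := by omega
    rw [this, List.getElem?_take]
    simp [show j - k < j + 1 by omega]
  have hb : ∀ k, k < m → (lines.drop (j+1))[k]? = lines[j+1+k]? := by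
    intro k hk; rw [List.getElem?_drop]
  have hget : ∀ p : Nat, p < L → PySem.List.pyGetD lines (p : Int) "" = lines.getD p "" := by
    intro p hp; simp [PySem.List.pyGetD_natCast]
  constructor
  · rintro ⟨h1, h2⟩ k ⟨hk0, hkm⟩
    have hkn : k.toNat < m := by omega
    have e1 : (j:Int) - k = ((j - k.toNat : Nat) : Int) := by omega
    have e2 : (j:Int) + 1 + k = ((j + 1 + k.toNat : Nat) : Int) := by omega
    rw [e1, e2, PySem.List.pyGetD_natCast, PySem.List.pyGetD_natCast]
    have := h2 k.toNat hkn
    rw [ha _ hkn, hb _ hkn] at this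
    simp [List.getD, this]
  · intro h
    have hP : ∀ k : Nat, k < m → lines[j-k]? = lines[j+1+k]? := by
      intro k hk
      have := h (k : Int) ⟨by omega, by omega⟩
      have e1 : (j:Int) - (k:Int) = ((j - k : Nat) : Int) := by omega
      have e2 : (j:Int) + 1 + (k:Int) = ((j + 1 + k : Nat) : Int) := by omega
      rw [e1, e2, PySem.List.pyGetD_natCast, PySem.List.pyGetD_natCast] at this
      have hjk : j - k < L := by omega
      have hjk2 : j + 1 + k < L := by omega
      simp only [List.getD, List.getElem?_eq_getElem hjk, List.getElem?_eq_getElem hjk2,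
        Option.getD_some] at this ⊢
      exact congrArg some this
    constructor
    · have := hP 0 hm1
      simp only [Nat.sub_zero, Nat.add_zero] at this
      have e : (j:Int) + 1 = ((j+1 : Nat) : Int) := by omega
      rw [e, PySem.List.pyGetD_natCast, PySem.List.pyGetD_natCast]
      simp [List.getD, this]
    · intro k hk
      rw [ha _ hk, hb _ hk]
      exact hP k hk

-- ===== VERDICT (by name: the statement is the Claim_ definition above) =====
theorem find_all_symetric_spec : Claim_equal_find_all_symetric := by
  intro lines _
  unfold Spec_find_all_symetric find_all_symetric find_all_symetric_alt
    split_lines_into_two_part_from_indice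
  simp only []
  have hcomb : (PySem.List.pyRange 0 ((lines.length : Int) - 1) 1).foldl
      (fun list_symetric i =>
        if PySem.List.pyGetD lines i "" == PySem.List.pyGetD lines (i + 1) "" then
          if PySem.List.slice ((PySem.List.slice lines none (some (i + 1))).reverse) (some 0)
              (some (min (((PySem.List.slice lines none (some (i + 1))).reverse.length : Nat) : Int)
                ((PySem.List.slice lines (some (i + 1)) none).length : Int)))
              == PySem.List.slice (PySem.List.slice lines (some (i + 1)) none) (some 0)
              (some (min (((PySem.List.slice lines none (some (i + 1))).reverse.length : Nat) : Int)
                ((PySem.List.slice lines (some (i + 1)) none).length : Int))) then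
            list_symetric ++ [i]
          else list_symetric
        else list_symetric) [] =
      (PySem.List.pyRange 0 ((lines.length : Int) - 1) 1).foldl
      (fun list_symetric i =>
        if ((PySem.List.pyGetD lines i "" == PySem.List.pyGetD lines (i + 1) "") &&
            (PySem.List.slice ((PySem.List.slice lines none (some (i + 1))).reverse) (some 0)
              (some (min (((PySem.List.slice lines none (some (i + 1))).reverse.length : Nat) : Int)
                ((PySem.List.slice lines (some (i + 1)) none).length : Int)))
              == PySem.List.slice (PySem.List.slice lines (some (i + 1)) none) (some 0)
              (some (min (((PySem.List.slice lines none (some (i + 1))).reverse.length : Nat) : Int)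
                ((PySem.List.slice lines (some (i + 1)) none).length : Int))))) then
          list_symetric ++ [i]
        else list_symetric) [] := by
    apply PySem.List.foldl_congr_mem
    intro acc i _
    by_cases h1 : (PySem.List.pyGetD lines i "" == PySem.List.pyGetD lines (i + 1) "") = true
    · simp [h1]
    · simp at h1
      simp [h1]
  rw [hcomb, PySem.List.foldl_append_if_eq_filter]
  rw [List.nil_append]
  apply List.filter_congr
  intro i hi
  rw [PySem.List.mem_pyRange_one] at hi
  obtain ⟨hi0, hiL⟩ := hi
  have hj : i = ((i.toNat : Nat) : Int) := by omega
  set j : Nat := i.toNat with hjdef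
  have hjL : j + 1 < lines.length := by omega
  rw [hj]
  have e1 : ((j : Nat) : Int) + 1 = (((j + 1 : Nat)) : Int) := by omega
  rw [e1, PySem.List.slice_to_natCast, PySem.List.slice_from_natCast, ← e1]
  exact pv_cond_eq lines j hjL
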